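-- pv_equiv track=rewrite | github.com/ihoward40/SintraPrime-Unified | core/universe/marketplace/skill_reviews.py | is_abusive
-- ===== SOURCE A (Python) =====
-- def is_abusive(review_text: str) -> bool:
--     """Detect abusive language"""
--     # Simple keyword-based detection
--     ABUSIVE_KEYWORDS = [
--         "stupid", "idiot", "worthless", "garbage",
--         "hate", "disgusting", "terrible"
--     ]
--
--     text_lower = review_text.lower()
--     for keyword in ABUSIVE_KEYWORDS:
--         if keyword in text_lower:
--             return True
--
--     return False
-- ===== SOURCE B (Python) =====
-- _KEYWORDS = ("stupid", "idiot", "worthless", "garbage",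
--              "hate", "disgusting", "terrible")
--
-- def is_abusive(review_text: str) -> bool:
--     """Detect abusive language: single left-to-right scan over positions,
--     checking whether any keyword starts at the current position."""
--     t = review_text.lower()
--     for i in range(len(t)):
--         for kw in _KEYWORDS:
--             if t.startswith(kw, i):
--                 return True
--     return False
-- ===== Notes on version B (the rewrite author's own statement) =====
-- stated objective: alternative
-- what changed: Replaces A's keyword-major loop of seven independent full-text substring scans by a single position-major left-to-right pass that checks at each index whether any keyword starts there.
import Mathlib
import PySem

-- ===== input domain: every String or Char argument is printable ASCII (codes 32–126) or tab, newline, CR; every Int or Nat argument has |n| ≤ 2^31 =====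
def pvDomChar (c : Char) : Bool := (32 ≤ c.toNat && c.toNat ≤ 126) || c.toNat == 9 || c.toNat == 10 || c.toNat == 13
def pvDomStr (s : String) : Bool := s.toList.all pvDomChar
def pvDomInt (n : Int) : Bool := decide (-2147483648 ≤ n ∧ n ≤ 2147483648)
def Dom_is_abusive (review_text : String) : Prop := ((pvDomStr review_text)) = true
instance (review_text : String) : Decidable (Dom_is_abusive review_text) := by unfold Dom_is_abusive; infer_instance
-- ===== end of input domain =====

-- B replaces A's keyword-major loop of seven full-text substring scans by one
-- position-major left-to-right scan checking each keyword as a prefix at each index.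


-- ===== PORT A =====
def abusiveKeywords : List String :=
  ["stupid", "idiot", "worthless", "garbage", "hate", "disgusting", "terrible"]

-- for-loop with early return over the keywords, each doing `keyword in text_lower`
def is_abusive (review_text : String) : Bool :=
  let textLower := PySem.Str.lower review_text
  abusiveKeywords.any (fun kw => PySem.Str.isIn kw textLower)

-- ===== PORT B =====
def altKeywords : List (List Char) :=
  ["stupid".toList, "idiot".toList, "worthless".toList, "garbage".toList,
   "hate".toList, "disgusting".toList, "terrible".toList]

-- the position loop `for i in range(len(t))`: structural recursion over suffixes;
-- `t.startswith(kw, i)` is a prefix test at the current suffix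
def altScan (t : List Char) : Bool :=
  match t with
  | [] => false
  | _ :: rest => altKeywords.any (fun kw => decide (kw <+: t)) || altScan rest

def is_abusive_alt (review_text : String) : Bool :=
  altScan (PySem.Chars.lower review_text.toList)

-- ===== PRECONDITION & SPEC =====
def Spec_is_abusive (review_text : String) (out : Bool) : Prop := out = is_abusive_alt review_text
instance (review_text : String) (out : Bool) : Decidable (Spec_is_abusive review_text out) := by unfold Spec_is_abusive; infer_instance

-- ===== CLAIM (what is proved, stated in full; the proofs are below) =====
def Claim_equal_is_abusive : Prop := ∀ (review_text : String), Dom_is_abusive review_text → Spec_is_abusive review_text (is_abusive review_text)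

-- ===== LEMMAS AND PROOFS =====
theorem altScan_iff (t : List Char) :
    altScan t = true ↔ ∃ kw ∈ altKeywords, ∃ j, kw <+: t.drop j := by
  induction t with
  | nil =>
    simp [altScan, altKeywords]
  | cons c rest ih =>
    simp only [altScan, Bool.or_eq_true, List.any_eq_true, decide_eq_true_eq, ih]
    constructor
    · rintro (⟨kw, hk, hp⟩ | ⟨kw, hk, j, hp⟩)
      · exact ⟨kw, hk, 0, by simpa using hp⟩
      · exact ⟨kw, hk, j + 1, by simpa using hp⟩
    · rintro ⟨kw, hk, j, hp⟩
      cases j with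
      | zero => exact Or.inl ⟨kw, hk, by simpa using hp⟩
      | succ j => exact Or.inr ⟨kw, hk, j, by simpa using hp⟩

theorem keywords_toList :
    abusiveKeywords.map String.toList = altKeywords := by
  decide

-- ===== VERDICT (by name: the statement is the Claim_ definition above) =====
theorem is_abusive_spec : Claim_equal_is_abusive := by
  intro s _
  show is_abusive s = is_abusive_alt s
  rw [Bool.eq_iff_iff]
  unfold is_abusive is_abusive_alt
  rw [altScan_iff]
  simp only [List.any_eq_true]
  constructor
  · rintro ⟨kw, hk, hin⟩
    rw [PySem.Str.isIn_iff_infix] at hin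
    rw [PySem.Str.toList_lower] at hin
    rcases List.infix_iff_prefix_suffix.mp hin with ⟨u, hu, hsuf⟩
    rcases hsuf with ⟨v, hv⟩
    refine ⟨kw.toList, ?_, v.length, ?_⟩
    · rw [← keywords_toList]; exact List.mem_map_of_mem hk
    · rw [← hv]; simpa using hu
  · rintro ⟨kw, hk, j, hp⟩
    rw [← keywords_toList] at hk
    rcases List.mem_map.mp hk with ⟨w, hw, rfl⟩
    refine ⟨w, hw, ?_⟩
    rw [PySem.Str.isIn_iff_infix, PySem.Str.toList_lower]
    exact hp.isInfix.trans (List.drop_suffix j _).isInfix
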